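-- pv_equiv track=rewrite | github.com/juanelojga/aiecommerce-agents | scripts/test_step5_ml_publish.py | _collect_build_assets
-- ===== SOURCE A (Python) =====
-- def _collect_build_assets(
--     tower_hash: str,
--     assets: list[dict[str, object]],
-- ) -> tuple[list[str], str | None]:
--     """Collect image and video URLs for a build from the assets list.
--
--     Args:
--         tower_hash: SHA-256 hash identifying the tower build.
--         assets: List of serialised creative asset dicts.
--
--     Returns:
--         Tuple of (image_urls, video_url).
--     """
--     image_urls: list[str] = []
--     video_url: str | None = None
--
--     for asset in assets:
--         media_type = str(asset.get("media_type", ""))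
--         url = str(asset.get("url", ""))
--         if not url:
--             continue
--         if media_type == "image":
--             image_urls.append(url)
--         elif media_type == "video" and video_url is None:
--             video_url = url
--
--     return image_urls, video_url
-- ===== SOURCE B (Python) =====
-- def _collect_build_assets(tower_hash, assets):
--     # Group every non-empty url by its media_type in one indexing pass,
--     # then read the two answers off the index.
--     groups = {}
--     for asset in assets:
--         url = str(asset.get("url", ""))
--         if url:
--             groups.setdefault(str(asset.get("media_type", "")), []).append(url)
--     videos = groups.get("video", [])
--     return groups.get("image", []), (videos[0] if videos else None)
-- ===== Notes on version B (the rewrite author's own statement) =====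
-- stated objective: alternative
-- what changed: Replaced A's two special-cased accumulators (image list + first-video flag with branch-per-tag) by a generic group-by index: one pass builds a dict mapping media_type to its non-empty urls, and the result is read off the index ('image' bucket, head of the 'video' bucket).
import Mathlib
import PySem

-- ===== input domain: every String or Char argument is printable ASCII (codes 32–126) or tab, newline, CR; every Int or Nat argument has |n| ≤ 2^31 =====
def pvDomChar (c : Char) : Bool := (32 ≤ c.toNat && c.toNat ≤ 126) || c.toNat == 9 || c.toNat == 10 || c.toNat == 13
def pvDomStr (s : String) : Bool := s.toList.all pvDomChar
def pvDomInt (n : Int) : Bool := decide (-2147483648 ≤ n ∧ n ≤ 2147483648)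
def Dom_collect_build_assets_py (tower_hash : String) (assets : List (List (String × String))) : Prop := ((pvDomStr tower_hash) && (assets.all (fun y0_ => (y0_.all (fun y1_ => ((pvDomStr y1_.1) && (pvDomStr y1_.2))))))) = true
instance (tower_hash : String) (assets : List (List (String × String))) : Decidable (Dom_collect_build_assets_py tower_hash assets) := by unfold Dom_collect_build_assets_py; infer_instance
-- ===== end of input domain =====

-- B replaces A's two hand-maintained accumulators by a generic group-by dict (media_type → urls) read off at the end; equivalence proved below.
-- ===== PORT A =====
-- dict.get(k, dflt) on the association list (first match); shared by both ports
def pvGetD (l : List (String × String)) (k dflt : String) : String :=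
  match l.find? (fun p => p.1 == k) with
  | some p => p.2
  | none => dflt

def collect_build_assets_py (tower_hash : String) (assets : List (List (String × String))) : List String × Option String :=
  assets.foldl (fun s asset =>
    let media_type := pvGetD asset "media_type" ""
    let url := pvGetD asset "url" ""
    if url = "" then s
    else if media_type = "image" then (s.1 ++ [url], s.2)
    else if media_type = "video" && s.2.isNone then (s.1, some url)
    else s) ([], none)

-- ===== PORT B =====
def collect_build_assets_py_alt (tower_hash : String) (assets : List (List (String × String))) : List String × Option String :=
  let groups : PySem.Dict String (List String) := assets.foldl (fun d asset =>
    let url := pvGetD asset "url" ""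
    if url = "" then d
    else d.modify (pvGetD asset "media_type" "") [] (· ++ [url])) PySem.Dict.empty
  let videos := groups.getD "video" []
  (groups.getD "image" [], videos.head?)

-- ===== PRECONDITION & SPEC =====
def Spec_collect_build_assets_py (tower_hash : String) (assets : List (List (String × String))) (out : List String × Option String) : Prop := out = collect_build_assets_py_alt tower_hash assets
instance (tower_hash : String) (assets : List (List (String × String))) (out : List String × Option String) : Decidable (Spec_collect_build_assets_py tower_hash assets out) := by unfold Spec_collect_build_assets_py; infer_instance

-- ===== CLAIM (what is proved, stated in full; the proofs are below) =====
def Claim_equal_collect_build_assets_py : Prop := ∀ (tower_hash : String) (assets : List (List (String × String))), Dom_collect_build_assets_py tower_hash assets → Spec_collect_build_assets_py tower_hash assets (collect_build_assets_py tower_hash assets)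

-- ===== LEMMAS AND PROOFS =====
-- the urls of assets carrying media_type c and a non-empty url, in order
def pvUrlsOf (c : String) (assets : List (List (String × String))) : List String :=
  assets.filterMap (fun asset =>
    if pvGetD asset "media_type" "" = c ∧ pvGetD asset "url" "" ≠ "" then some (pvGetD asset "url" "") else none)

-- A's loop invariant: from state (imgs, v) it appends the image urls and fills v with the first video url.
theorem collect_fold_inv (assets : List (List (String × String))) (imgs : List String) (v : Option String) :
    assets.foldl (fun s asset =>
      let media_type := pvGetD asset "media_type" ""
      let url := pvGetD asset "url" ""
      if url = "" then s
      else if media_type = "image" then (s.1 ++ [url], s.2)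
      else if media_type = "video" && s.2.isNone then (s.1, some url)
      else s) (imgs, v)
    = (imgs ++ pvUrlsOf "image" assets,
       v.orElse (fun _ => (pvUrlsOf "video" assets).head?)) := by
  induction assets generalizing imgs v with
  | nil => simp [pvUrlsOf]
  | cons a rest ih =>
    simp only [List.foldl_cons, pvUrlsOf, List.filterMap_cons]
    by_cases hu : pvGetD a "url" "" = ""
    · simp only [hu]
      rw [ih]
      simp [pvUrlsOf]
    · by_cases hm : pvGetD a "media_type" "" = "image"
      · simp only [hu, hm, if_neg hu]
        rw [ih]
        simp [pvUrlsOf, hu]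
      · by_cases hv : pvGetD a "media_type" "" = "video"
        · cases v with
          | none =>
            simp only [hu, hv]
            rw [ih]
            simp [pvUrlsOf, hu, Option.orElse]
          | some w =>
            simp only [hu, hv]
            rw [ih]
            simp [pvUrlsOf, hu, Option.orElse]
        · simp only [if_neg hu, if_neg hm]
          rw [if_neg (by simp [hv])]
          rw [ih]
          simp [pvUrlsOf, hm, hv, hu]

-- B's loop invariant: after the grouping pass, bucket c holds its previous contents followed by pvUrlsOf c.
theorem groups_getD (assets : List (List (String × String))) (d : PySem.Dict String (List String)) (c : String) :
    (assets.foldl (fun d asset =>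
      let url := pvGetD asset "url" ""
      if url = "" then d
      else d.modify (pvGetD asset "media_type" "") [] (· ++ [url])) d).getD c []
    = d.getD c [] ++ pvUrlsOf c assets := by
  induction assets generalizing d with
  | nil => simp [pvUrlsOf]
  | cons a rest ih =>
    simp only [List.foldl_cons, pvUrlsOf, List.filterMap_cons]
    by_cases hu : pvGetD a "url" "" = ""
    · simp only [hu]
      rw [ih]
      simp [pvUrlsOf, hu]
    · simp only [if_neg hu]
      rw [ih]
      by_cases hc : pvGetD a "media_type" "" = c
      · rw [PySem.Dict.getD_modify]
        simp [pvUrlsOf, hc, hu]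
      · rw [PySem.Dict.getD_modify]
        simp [pvUrlsOf, hc, hu, Ne.symm hc]

-- ===== VERDICT (by name: the statement is the Claim_ definition above) =====
theorem collect_build_assets_py_spec : Claim_equal_collect_build_assets_py := by
  intro tower_hash assets _
  unfold Spec_collect_build_assets_py collect_build_assets_py collect_build_assets_py_alt
  rw [collect_fold_inv]
  simp only [groups_getD, PySem.Dict.getD_empty]
  simp [Option.orElse]
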